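-- pv_equiv track=rewrite | github.com/LumberKnot/advent_of_code_25 | src/dec11.py | find_num_allowed_paths
-- ===== SOURCE A (Python) =====
-- def find_num_allowed_paths(graph, traversed: set, current, reqired, target="out"):
--     """Question is a bit unclear but my theory is
--
--     Nodes - can be traversed once (Try out)
--     Edges - can only be traversed once!
--
--     Solve with depth first
--
--     Termination conditions
--         Reached target - return 1 if all required have been traversed
--         No nodes to traverse - return 0
--
--     """
--
--     if current == target:
--         # Since we know required does not overlap with "out" we can:
--         nodes = {s for s in traversed}
--         # if (nodes & reqired) == reqired:
--         return 1
--         return 0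
--
--     paths = 0
--
--     for next in graph.get(current, []):
--         if next not in traversed:  # not yet traversed node
--             traversed.add(next)
--             paths += find_num_allowed_paths(graph, traversed, next, reqired, target)
--             traversed.remove(next)
--
--     return paths
-- ===== SOURCE B (Python) =====
-- def _count_paths(g, current, target):
--     if current == target:
--         return 1
--     total = 0
--     for nxt in g.get(current, []):
--         g2 = {u: [v for v in vs if v != nxt] for u, vs in g.items()}
--         total += _count_paths(g2, nxt, target)
--     return total
--
--
-- def find_num_allowed_paths(graph, traversed: set, current, reqired, target="out"):
--     pruned = {u: [v for v in vs if v not in traversed] for u, vs in graph.items()}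
--     return _count_paths(pruned, current, target)
-- ===== Notes on version B (the rewrite author's own statement) =====
-- stated objective: alternative
-- what changed: B keeps no visited set at all: it filters the traversed nodes out of every adjacency list once up front, then deletes each node from the whole graph when descending into it, so the recursion carries a shrinking graph instead of a growing set.
import Mathlib
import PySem

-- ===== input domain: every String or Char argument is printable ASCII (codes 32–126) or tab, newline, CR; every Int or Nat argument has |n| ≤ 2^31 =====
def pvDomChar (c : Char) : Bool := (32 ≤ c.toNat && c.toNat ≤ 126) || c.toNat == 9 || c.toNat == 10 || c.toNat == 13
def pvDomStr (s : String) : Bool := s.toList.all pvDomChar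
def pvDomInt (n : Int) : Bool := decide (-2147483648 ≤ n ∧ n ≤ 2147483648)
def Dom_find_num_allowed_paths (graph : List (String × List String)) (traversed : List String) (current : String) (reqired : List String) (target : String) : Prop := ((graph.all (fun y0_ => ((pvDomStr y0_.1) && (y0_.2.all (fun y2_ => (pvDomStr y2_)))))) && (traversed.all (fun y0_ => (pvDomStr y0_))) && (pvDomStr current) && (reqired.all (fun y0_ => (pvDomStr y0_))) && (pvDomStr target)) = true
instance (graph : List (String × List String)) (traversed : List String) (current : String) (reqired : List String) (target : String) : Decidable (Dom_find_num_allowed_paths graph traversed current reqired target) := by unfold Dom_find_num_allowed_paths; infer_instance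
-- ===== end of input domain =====

-- B re-implements the DFS path count without any visited set: it filters the traversed
-- nodes out of the graph once, then DELETES each node from the whole graph when
-- descending into it (objective: alternative decomposition, same value everywhere;
-- A restores its `traversed` set before returning, so neither call mutates observably).

-- graph.get(c, []) : first-match lookup on the association list (dict convention)
def pvGetAdj (g : List (String × List String)) (c : String) : List String :=
  PySem.Dict.getD (PySem.Dict.mk g) c []

-- ===== PORT A =====
-- Number of distinct not-yet-traversed neighbour occurrences: an upper bound on the
-- remaining DFS depth (each descent adds a node to `traversed`).  Used only to seed
-- the structural fuel that replaces Python's unbounded recursion.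
def pvFree (g : List (String × List String)) (tr : List String) : Nat :=
  (((g.map Prod.snd).flatten).filter (fun x => !(PySem.Set.contains tr x))).length

def pvRunA (fuel : Nat) (graph : List (String × List String)) (traversed : List String) (current : String) (reqired : List String) (target : String) : Int :=
  match fuel with
  | 0 => 0  -- unreachable: every recursive call strictly shrinks pvFree, which seeds fuel
  | fuel + 1 =>
    if current == target then 1
    else
      (pvGetAdj graph current).foldl
        (fun paths next =>
          if !(PySem.Set.contains traversed next) then
            paths + pvRunA fuel graph (PySem.Set.add traversed next) next reqired target
          else paths) 0

def find_num_allowed_paths (graph : List (String × List String)) (traversed : List String) (current : String) (reqired : List String) (target : String) : Int :=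
  pvRunA (pvFree graph traversed + 1) graph traversed current reqired target

-- ===== PORT B =====
-- {u: [v for v in vs if v not in traversed] for u, vs in graph.items()}
def pvPruneSet (g : List (String × List String)) (tr : List String) : List (String × List String) :=
  g.map (fun p => (p.1, p.2.filter (fun v => !(PySem.Set.contains tr v))))

-- {u: [v for v in vs if v != n] for u, vs in g.items()}
def pvPruneNode (g : List (String × List String)) (n : String) : List (String × List String) :=
  g.map (fun p => (p.1, p.2.filter (fun v => !(v == n))))

def pvRunB (fuel : Nat) (g : List (String × List String)) (current : String) (target : String) : Int :=
  match fuel with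
  | 0 => 0  -- unreachable: every descent deletes an edge occurrence, which seeds fuel
  | fuel + 1 =>
    if current == target then 1
    else
      (pvGetAdj g current).foldl
        (fun total n => total + pvRunB fuel (pvPruneNode g n) n target) 0

def find_num_allowed_paths_alt (graph : List (String × List String)) (traversed : List String) (current : String) (reqired : List String) (target : String) : Int :=
  pvRunB ((((pvPruneSet graph traversed).map Prod.snd).flatten).length + 1)
    (pvPruneSet graph traversed) current target

-- ===== PRECONDITION & SPEC =====
def Spec_find_num_allowed_paths (graph : List (String × List String)) (traversed : List String) (current : String) (reqired : List String) (target : String) (out : Int) : Prop := out = find_num_allowed_paths_alt graph traversed current reqired target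
instance (graph : List (String × List String)) (traversed : List String) (current : String) (reqired : List String) (target : String) (out : Int) : Decidable (Spec_find_num_allowed_paths graph traversed current reqired target out) := by unfold Spec_find_num_allowed_paths; infer_instance

-- ===== CLAIM (what is proved, stated in full; the proofs are below) =====
def Claim_equal_find_num_allowed_paths : Prop := ∀ (graph : List (String × List String)) (traversed : List String) (current : String) (reqired : List String) (target : String), Dom_find_num_allowed_paths graph traversed current reqired target → Spec_find_num_allowed_paths graph traversed current reqired target (find_num_allowed_paths graph traversed current reqired target)

-- ===== LEMMAS AND PROOFS =====

-- the adjacency list returned by first-match lookup is one of the graph's value lists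
theorem pv_adj_subset (g : List (String × List String)) (c : String) :
    ∀ x ∈ pvGetAdj g c, x ∈ (g.map Prod.snd).flatten := by
  induction g with
  | nil => simp [pvGetAdj, PySem.Dict.getD, PySem.Dict.get?]
  | cons p g ih =>
    intro x hx
    rw [pvGetAdj, PySem.Dict.getD_eq_get?_getD] at hx
    obtain ⟨k, v⟩ := p
    rw [PySem.Dict.get?_mk_cons] at hx
    by_cases hk : (k == c) = true
    · simp only [hk, if_pos] at hx
      simp only [List.map_cons, List.flatten_cons]
      exact List.mem_append_left _ hx
    · simp only [hk, if_neg, Bool.false_eq_true, not_false_iff] at hx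
      simp only [List.map_cons, List.flatten_cons]
      refine List.mem_append_right _ (ih x ?_)
      rw [pvGetAdj, PySem.Dict.getD_eq_get?_getD]
      exact hx

-- lookup commutes with mapping a []-preserving function over the values
theorem pv_adj_map (f : List String → List String) (hf : f [] = [])
    (g : List (String × List String)) (c : String) :
    pvGetAdj (g.map (fun p => (p.1, f p.2))) c = f (pvGetAdj g c) := by
  induction g with
  | nil => simp [pvGetAdj, PySem.Dict.getD, PySem.Dict.get?, hf]
  | cons p g ih =>
    obtain ⟨k, v⟩ := p
    simp only [List.map_cons, pvGetAdj, PySem.Dict.getD_eq_get?_getD,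
      PySem.Dict.get?_mk_cons] at *
    by_cases hk : (k == c) = true
    · simp [hk]
    · simpa [hk] using ih

theorem pv_adj_pruneSet (g : List (String × List String)) (tr : List String) (c : String) :
    pvGetAdj (pvPruneSet g tr) c = (pvGetAdj g c).filter (fun v => !(PySem.Set.contains tr v)) :=
  pv_adj_map _ rfl g c

-- membership in a set built by Set.add, at the Bool level
theorem pv_contains_add (tr : List String) (n v : String) :
    PySem.Set.contains (PySem.Set.add tr n) v = (PySem.Set.contains tr v || v == n) := by
  rw [PySem.Set.add_eq_ite]
  by_cases hn : n ∈ tr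
  · simp only [hn, if_pos]
    by_cases hv : v = n
    · subst hv
      simp [PySem.Set.contains_eq_listContains, hn]
    · simp [hv, beq_iff_eq]
  · simp only [hn, if_neg, not_false_iff]
    by_cases hv : v = n <;>
      simp [PySem.Set.contains_eq_listContains, hv]

-- deleting n from the graph already pruned by tr = pruning by tr.add(n)
theorem pv_prune_prune (g : List (String × List String)) (tr : List String) (n : String) :
    pvPruneNode (pvPruneSet g tr) n = pvPruneSet g (PySem.Set.add tr n) := by
  unfold pvPruneNode pvPruneSet
  rw [List.map_map]
  apply List.map_congr_left
  intro p _
  simp only [Function.comp]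
  refine Prod.ext rfl ?_
  rw [List.filter_filter]
  apply List.filter_congr
  intro v _
  rw [pv_contains_add]
  by_cases hv : (v == n) = true <;> by_cases htr : PySem.Set.contains tr v <;>
    simp_all

-- the pruned graph's total edge count is exactly pvFree
theorem pv_total_prune (g : List (String × List String)) (tr : List String) :
    (((pvPruneSet g tr).map Prod.snd).flatten).length = pvFree g tr := by
  unfold pvPruneSet pvFree
  rw [List.map_map]
  have : (List.map (Prod.snd ∘ fun p : String × List String =>
      (p.1, p.2.filter (fun v => !(PySem.Set.contains tr v)))) g)
      = List.map (List.filter (fun v => !(PySem.Set.contains tr v))) (g.map Prod.snd) := by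
    rw [List.map_map]; rfl
  rw [this, ← List.filter_flatten]

-- descending into a fresh neighbour strictly shrinks pvFree
theorem pv_free_lt (g : List (String × List String)) (tr : List String) (n : String)
    (hn : n ∈ (g.map Prod.snd).flatten) (hmem : PySem.Set.contains tr n = false) :
    pvFree g (PySem.Set.add tr n) < pvFree g tr := by
  unfold pvFree
  have hsub : ((g.map Prod.snd).flatten).filter (fun x => !(PySem.Set.contains (PySem.Set.add tr n) x))
      = (((g.map Prod.snd).flatten).filter (fun x => !(PySem.Set.contains tr x))).filter
        (fun x => !(x == n)) := by
    rw [List.filter_filter]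
    apply List.filter_congr
    intro v _
    rw [pv_contains_add]
    by_cases hv : (v == n) = true <;> by_cases htr : PySem.Set.contains tr v <;>
      simp_all
  rw [hsub]
  apply List.length_filter_lt_length_iff_exists.mpr
  have hnotin : n ∉ tr := by simpa using hmem
  refine ⟨n, ?_, by simp⟩
  exact List.mem_filter.mpr ⟨hn, by simp [hnotin]⟩

-- main induction: with enough fuel, A's DFS over (graph, traversed) equals B's DFS
-- over the pruned graph
theorem pv_key : ∀ (f : Nat) (g : List (String × List String)) (tr : List String)
    (c : String) (r : List String) (t : String), pvFree g tr < f →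
    pvRunA f g tr c r t = pvRunB f (pvPruneSet g tr) c t := by
  intro f
  induction f with
  | zero => intro g tr c r t h; exact absurd h (Nat.not_lt_zero _)
  | succ f ih =>
    intro g tr c r t h
    rw [pvRunA, pvRunB]
    by_cases hct : (c == t) = true
    · simp [hct]
    · simp only [hct, if_neg, Bool.false_eq_true, not_false_iff]
      rw [pv_adj_pruneSet]
      have hfree : pvFree g tr ≤ f := Nat.lt_succ_iff.mp h
      suffices H : ∀ ns : List String, (∀ x ∈ ns, x ∈ (g.map Prod.snd).flatten) →
          ∀ acc : Int,
          ns.foldl (fun paths next =>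
            if !(PySem.Set.contains tr next) then
              paths + pvRunA f g (PySem.Set.add tr next) next r t
            else paths) acc
          = (ns.filter (fun v => !(PySem.Set.contains tr v))).foldl
              (fun total n => total + pvRunB f (pvPruneNode (pvPruneSet g tr) n) n t) acc from
        H _ (pv_adj_subset g c) 0
      intro ns
      induction ns with
      | nil => intro _ acc; rfl
      | cons n rest ihns =>
        intro hmem acc
        by_cases hn : PySem.Set.contains tr n
        · simp only [List.foldl_cons, List.filter_cons, hn, Bool.not_true,
            Bool.false_eq_true, if_neg, not_false_iff]
          exact ihns (fun x hx => hmem x (List.mem_cons_of_mem _ hx)) acc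
        · have hn' : PySem.Set.contains tr n = false := by
            cases hcontains : PySem.Set.contains tr n
            · rfl
            · exact absurd hcontains hn
          have hnfl : n ∈ (g.map Prod.snd).flatten := hmem n List.mem_cons_self
          have hlt : pvFree g (PySem.Set.add tr n) < f :=
            Nat.lt_of_lt_of_le (pv_free_lt g tr n hnfl hn') hfree
          simp only [List.foldl_cons, List.filter_cons, hn', Bool.not_false, if_pos]
          rw [pv_prune_prune, ← ih g (PySem.Set.add tr n) n r t hlt]
          exact ihns (fun x hx => hmem x (List.mem_cons_of_mem _ hx)) _

-- ===== VERDICT (by name: the statement is the Claim_ definition above) =====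
theorem find_num_allowed_paths_spec : Claim_equal_find_num_allowed_paths := by
  intro graph traversed current reqired target _
  unfold Spec_find_num_allowed_paths find_num_allowed_paths find_num_allowed_paths_alt
  rw [pv_total_prune]
  exact pv_key (pvFree graph traversed + 1) graph traversed current reqired target
    (Nat.lt_succ_self _)
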